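-- pv_equiv track=rewrite | github.com/posl/comment_recommendation | script/mod_gen/3_time/zh/285_D/7.py | change_handle
-- ===== SOURCE A (Python) =====
-- def change_handle(N, S, T):
--     for i in range(N):
--         for j in range(N):
--             if S[i] == T[j]:
--                 if i == j:
--                     continue
--                 else:
--                     return 'No'
--     return 'Yes'
-- ===== SOURCE B (Python) =====
-- def change_handle(N, S, T):
--     countT = {}
--     diag = 0
--     for i in range(N):
--         cs = S[i]
--         ct = T[i]
--         countT[ct] = countT.get(ct, 0) + 1
--         if cs == ct:
--             diag += 1
--     total = 0
--     for i in range(N):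
--         total += countT.get(S[i], 0)
--     return 'No' if total > diag else 'Yes'
-- ===== Notes on version B (the rewrite author's own statement) =====
-- stated objective: alternative
-- what changed: A scans index pairs with an early return on the first cross match; B instead makes one pass over range(N) building a frequency dict of T[:N] and a diagonal-agreement counter, then sums the multiplicities of each S[i] in that dict, answering 'No' iff total matches exceed diagonal matches (single-pass counting, but A's early exit makes it as fast in practice).
-- outside the precondition, e.g. on change_handle(3, [0, 1], [1, 0]): A returns 'No', B raises IndexError
import Mathlib
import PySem

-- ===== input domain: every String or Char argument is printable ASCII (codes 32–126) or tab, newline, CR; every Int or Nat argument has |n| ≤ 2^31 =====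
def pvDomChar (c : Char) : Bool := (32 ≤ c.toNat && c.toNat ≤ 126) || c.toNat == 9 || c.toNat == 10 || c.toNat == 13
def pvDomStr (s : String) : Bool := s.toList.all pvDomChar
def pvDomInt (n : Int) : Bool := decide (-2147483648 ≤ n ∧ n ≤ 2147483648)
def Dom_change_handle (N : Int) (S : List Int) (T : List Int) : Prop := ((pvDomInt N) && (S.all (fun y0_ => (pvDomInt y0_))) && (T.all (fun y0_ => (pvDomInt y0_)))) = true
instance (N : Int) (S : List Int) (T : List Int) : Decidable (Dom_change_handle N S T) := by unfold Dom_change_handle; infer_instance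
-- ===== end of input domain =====

-- B replaces A's nested early-exit pair scan by counting: total matches = sum of multiplicities
-- of each S[i] in T[:N], compared with diagonal agreements; equivalence on Pre_ (N within lengths).


-- ===== PORT A =====
-- literal port: 'No' iff some pair i ≠ j in range(N)×range(N) has S[i] == T[j];
-- out-of-range indexing (pyGet? = none, Python IndexError) is excluded by Pre_ below.
def change_handle (N : Int) (S : List Int) (T : List Int) : String :=
  if (PySem.List.pyRange 0 N).any (fun i =>
      (PySem.List.pyRange 0 N).any (fun j =>
        (PySem.List.pyGet? S i == PySem.List.pyGet? T j) && !(i == j)))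
  then "No" else "Yes"

-- ===== PORT B =====
-- literal port of Source B: one pass builds countT (a counter over T[:N]) and the diagonal count,
-- a second pass sums countT.get(S[i], 0); 'No' iff total > diag.
-- pyGetD _ _ 0 stands for the indexing that Python would raise on outside Pre_.
def change_handle_alt (N : Int) (S : List Int) (T : List Int) : String :=
  let st := (PySem.List.pyRange 0 N).foldl
    (fun (acc : PySem.Dict Int Int × Int) i =>
      (acc.1.insert (PySem.List.pyGetD T i 0) (acc.1.getD (PySem.List.pyGetD T i 0) 0 + 1),
       if PySem.List.pyGetD S i 0 == PySem.List.pyGetD T i 0 then acc.2 + 1 else acc.2))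
    (PySem.Dict.empty, (0 : Int))
  let total := (PySem.List.pyRange 0 N).foldl
    (fun tot i => tot + st.1.getD (PySem.List.pyGetD S i 0) 0) (0 : Int)
  if total > st.2 then "No" else "Yes"

-- ===== PRECONDITION & SPEC =====
-- Pre_ excludes N exceeding a list length: there Python A raises IndexError, or returns 'No'
-- when a cross match occurs before the first out-of-range access; B raises IndexError there.
def Pre_change_handle (N : Int) (S : List Int) (T : List Int) : Prop :=
  N ≤ (S.length : Int) ∧ N ≤ (T.length : Int)
instance (N : Int) (S : List Int) (T : List Int) : Decidable (Pre_change_handle N S T) := by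
  unfold Pre_change_handle; infer_instance

def pvWitness_change_handle : Int × List Int × List Int := (2, [1, 2], [3, 4])

def Spec_change_handle (N : Int) (S : List Int) (T : List Int) (out : String) : Prop := out = change_handle_alt N S T
instance (N : Int) (S : List Int) (T : List Int) (out : String) : Decidable (Spec_change_handle N S T out) := by unfold Spec_change_handle; infer_instance

-- ===== CLAIM (what is proved, stated in full; the proofs are below) =====
def Claim_equal_change_handle : Prop := ∀ (N : Int) (S : List Int) (T : List Int), Dom_change_handle N S T → Pre_change_handle N S T → Spec_change_handle N S T (change_handle N S T)

-- ===== LEMMAS AND PROOFS =====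

-- 'some pair i ≠ j with s[i] = t[j] exists', as a structural recursion on the two lists
def crossb : List Int → List Int → Bool
  | a :: s, b :: t => t.contains a || s.contains b || crossb s t
  | _, _ => false

def CrossP (s t : List Int) : Prop :=
  ∃ i j : Nat, i ≠ j ∧ ∃ v, s[i]? = some v ∧ t[j]? = some v

-- total number of index pairs (i, j) with s[i] = t[j]
def fnum (s t : List Int) : Nat := (s.map (fun x => t.count x)).sum
-- number of diagonal pairs (i, i) with s[i] = t[i]
def dnum (s t : List Int) : Nat := (s.zip t).countP (fun p => p.1 == p.2)

lemma sum_count_cons (s : List Int) (b : Int) (t : List Int) :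
    (s.map (fun x => (b :: t).count x)).sum = (s.map (fun x => t.count x)).sum + s.count b := by
  induction s with
  | nil => simp
  | cons a s ih =>
      simp only [List.map_cons, List.sum_cons, ih]
      rw [List.count_cons (b := b), List.count_cons (b := a)]
      rcases eq_or_ne a b with h | h
      · subst h; simp; omega
      · rw [if_neg (by simpa [beq_iff_eq] using Ne.symm h),
          if_neg (by simpa [beq_iff_eq] using h)]
        omega

lemma core (s t : List Int) :
    dnum s t ≤ fnum s t ∧ (dnum s t < fnum s t ↔ crossb s t = true) := by
  induction s generalizing t with
  | nil => simp [dnum, fnum, crossb]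
  | cons a s ih =>
    cases t with
    | nil => simp [dnum, fnum, crossb]
    | cons b t =>
      obtain ⟨ih1, ih2⟩ := ih t
      have hf : fnum (a :: s) (b :: t)
          = (t.count a + (if a = b then 1 else 0)) + (fnum s t + s.count b) := by
        simp only [fnum, List.map_cons, List.sum_cons, sum_count_cons]
        rw [List.count_cons (b := b)]
        rcases eq_or_ne a b with h | h
        · subst h; simp
        · rw [if_neg (by simpa [beq_iff_eq] using Ne.symm h), if_neg h]
      have hd : dnum (a :: s) (b :: t) = dnum s t + (if a = b then 1 else 0) := by
        simp only [dnum, List.zip_cons_cons, List.countP_cons, beq_iff_eq]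
      have hc : crossb (a :: s) (b :: t) = true
          ↔ 0 < t.count a ∨ 0 < s.count b ∨ crossb s t = true := by
        simp only [crossb, Bool.or_eq_true, List.contains_iff_mem, List.count_pos_iff,
          or_assoc]
      rw [hf, hd, hc, ← ih2]
      rcases eq_or_ne a b with h | h
      · rw [if_pos h]; omega
      · rw [if_neg h]; omega

lemma crossb_iff (s t : List Int) : crossb s t = true ↔ CrossP s t := by
  induction s generalizing t with
  | nil => simp [crossb, CrossP]
  | cons a s ih =>
    cases t with
    | nil => simp [crossb, CrossP]
    | cons b t =>
      constructor
      · intro h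
        rcases (by simpa [crossb, List.contains_iff_mem, or_assoc] using h :
            a ∈ t ∨ b ∈ s ∨ crossb s t = true) with h | h | h
        · obtain ⟨j, hj⟩ := List.mem_iff_getElem?.mp h
          exact ⟨0, j + 1, by omega, a, by simp, by simpa using hj⟩
        · obtain ⟨i, hi⟩ := List.mem_iff_getElem?.mp h
          exact ⟨i + 1, 0, by omega, b, by simpa using hi, by simp⟩
        · obtain ⟨i, j, hne, v, h1, h2⟩ := (ih t).mp h
          exact ⟨i + 1, j + 1, by omega, v, by simpa using h1, by simpa using h2⟩
      · rintro ⟨i, j, hne, v, h1, h2⟩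
        suffices h3 : a ∈ t ∨ b ∈ s ∨ crossb s t = true by
          simpa [crossb, List.contains_iff_mem, or_assoc] using h3
        match i, j with
        | 0, 0 => exact absurd rfl hne
        | 0, j + 1 =>
            refine Or.inl ?_
            simp only [List.getElem?_cons_zero, Option.some.injEq] at h1
            simp only [List.getElem?_cons_succ] at h2
            exact List.mem_iff_getElem?.mpr ⟨j, h1 ▸ h2⟩
        | i + 1, 0 =>
            refine Or.inr (Or.inl ?_)
            simp only [List.getElem?_cons_zero, Option.some.injEq] at h2
            simp only [List.getElem?_cons_succ] at h1
            exact List.mem_iff_getElem?.mpr ⟨i, h2 ▸ h1⟩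
        | i + 1, j + 1 =>
            refine Or.inr (Or.inr ?_)
            simp only [List.getElem?_cons_succ] at h1 h2
            exact (ih t).mpr ⟨i, j, by omega, v, h1, h2⟩

lemma pyRange_neg (N : Int) (h : N < 0) : PySem.List.pyRange 0 N = [] := by
  rw [List.eq_nil_iff_forall_not_mem]
  intro x hx
  have := PySem.List.mem_pyRange_one.mp hx
  omega

lemma take_eq_map_range (xs : List Int) (n : Nat) (h : n ≤ xs.length) :
    (List.range n).map (fun i => xs.getD i 0) = xs.take n := by
  apply List.ext_getElem
  · simp [h]
  · intro i h1 h2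
    simp only [List.getElem_map, List.getElem_range, List.getElem_take]
    rw [List.getD_eq_getElem _ _ (show i < xs.length by simp at h1; omega)]

lemma countP_range_eq_dnum (S T : List Int) (n : Nat)
    (hs : n ≤ S.length) (ht : n ≤ T.length) :
    (List.range n).countP (fun i => S.getD i 0 == T.getD i 0)
      = dnum (S.take n) (T.take n) := by
  induction n with
  | zero => simp [dnum]
  | succ n ih =>
    have hs' : n ≤ S.length := by omega
    have ht' : n ≤ T.length := by omega
    rw [List.range_succ, List.countP_append, ih hs' ht']
    have hgn : (S.getD n 0 == T.getD n 0) = (S[n]'(by omega) == T[n]'(by omega)) := by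
      rw [List.getD_eq_getElem _ _ (by omega), List.getD_eq_getElem _ _ (by omega)]
    have hS : S.take (n + 1) = S.take n ++ [S[n]'(by omega)] := by
      rw [List.take_add_one]
      congr 1
      rw [List.getElem?_eq_getElem (by omega)]
      simp
    have hT : T.take (n + 1) = T.take n ++ [T[n]'(by omega)] := by
      rw [List.take_add_one]
      congr 1
      rw [List.getElem?_eq_getElem (by omega)]
      simp
    have hz : (S.take (n + 1)).zip (T.take (n + 1))
        = (S.take n).zip (T.take n) ++ [(S[n]'(by omega), T[n]'(by omega))] := by
      rw [hS, hT, List.zip_append (by simp; omega)]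
      simp
    simp only [dnum, hz, List.countP_append]
    simp only [List.countP_cons, List.countP_nil, hgn]

lemma sum_map_cast (l : List Int) (f : Int → Nat) :
    (l.map (fun x => ((f x : Nat) : Int))).sum = (((l.map f).sum : Nat) : Int) := by
  induction l with
  | nil => simp
  | cons a l ih => simp [ih]

lemma A_eq (N : Int) (S T : List Int) (h0 : 0 ≤ N)
    (hs : N ≤ (S.length : Int)) (ht : N ≤ (T.length : Int)) :
    change_handle N S T
      = if crossb (S.take N.toNat) (T.take N.toNat) then "No" else "Yes" := by
  have hN : ((N.toNat : Nat) : Int) = N := Int.toNat_of_nonneg h0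
  have hns : N.toNat ≤ S.length := by omega
  have hnt : N.toNat ≤ T.length := by omega
  have hrange : PySem.List.pyRange 0 N = (List.range N.toNat).map (fun k : Nat => (k : Int)) := by
    conv_lhs => rw [← hN]
    exact PySem.List.pyRange_zero_natCast N.toNat
  have hcond :
      ((List.range N.toNat).map (fun k : Nat => (k : Int))).any (fun i =>
        ((List.range N.toNat).map (fun k : Nat => (k : Int))).any (fun j =>
          (PySem.List.pyGet? S i == PySem.List.pyGet? T j) && !(i == j)))
      = crossb (S.take N.toNat) (T.take N.toNat) := by
    rw [Bool.eq_iff_iff, crossb_iff]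
    simp only [List.any_map, Function.comp, List.any_eq_true, List.mem_range,
      Bool.and_eq_true, beq_iff_eq, Bool.not_eq_eq_eq_not, Bool.not_true,
      beq_eq_false_iff_ne, ne_eq, Int.natCast_inj, PySem.List.pyGet?_natCast]
    constructor
    · rintro ⟨i, hi, j, hj, heq, hne⟩
      have hv : S[i]? = some (S[i]'(by omega)) := List.getElem?_eq_getElem (by omega)
      refine ⟨i, j, hne, S[i]'(by omega), ?_, ?_⟩
      · rw [List.getElem?_take]
        simp [hi, hv]
      · rw [List.getElem?_take]
        simp [hj, ← heq, hv]
    · rintro ⟨i, j, hne, v, h1, h2⟩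
      rw [List.getElem?_take] at h1 h2
      by_cases hi : i < N.toNat
      · by_cases hj : j < N.toNat
        · simp only [if_pos hi] at h1
          simp only [if_pos hj] at h2
          exact ⟨i, hi, j, hj, by rw [h1, h2], hne⟩
        · rw [if_neg hj] at h2; simp at h2
      · rw [if_neg hi] at h1; simp at h1
  unfold change_handle
  rw [hrange, hcond]

lemma B_eq (N : Int) (S T : List Int) (h0 : 0 ≤ N)
    (hs : N ≤ (S.length : Int)) (ht : N ≤ (T.length : Int)) :
    change_handle_alt N S T
      = if dnum (S.take N.toNat) (T.take N.toNat)
            < fnum (S.take N.toNat) (T.take N.toNat) then "No" else "Yes" := by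
  have hN : ((N.toNat : Nat) : Int) = N := Int.toNat_of_nonneg h0
  have hns : N.toNat ≤ S.length := by omega
  have hnt : N.toNat ≤ T.length := by omega
  have hrange : PySem.List.pyRange 0 N = (List.range N.toNat).map (fun k : Nat => (k : Int)) := by
    conv_lhs => rw [← hN]
    exact PySem.List.pyRange_zero_natCast N.toNat
  unfold change_handle_alt
  rw [hrange]
  rw [PySem.List.foldl_prod_mk
    (f := fun (d : PySem.Dict Int Int) i =>
      d.insert (PySem.List.pyGetD T i 0) (d.getD (PySem.List.pyGetD T i 0) 0 + 1))
    (g := fun (c : Int) i =>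
      if PySem.List.pyGetD S i 0 == PySem.List.pyGetD T i 0 then c + 1 else c)]
  simp only [List.foldl_map, PySem.List.pyGetD_natCast]
  -- the dict is Counter(T[:n])
  have hdict : (List.range N.toNat).foldl
      (fun (d : PySem.Dict Int Int) i =>
        d.insert (T.getD i 0) (d.getD (T.getD i 0) 0 + 1)) PySem.Dict.empty
      = PySem.Dict.counter (T.take N.toNat) := by
    rw [← PySem.Dict.foldl_insert_getD_add_one_eq_counter,
      ← take_eq_map_range T N.toNat hnt, List.foldl_map]
  -- the diagonal counter
  have hdiag : (List.range N.toNat).foldl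
      (fun (c : Int) i => if S.getD i 0 == T.getD i 0 then c + 1 else c) 0
      = ((dnum (S.take N.toNat) (T.take N.toNat) : Nat) : Int) := by
    rw [PySem.List.foldl_if_add_one (p := fun i => S.getD i 0 == T.getD i 0),
      countP_range_eq_dnum S T N.toNat hns hnt]
    omega
  rw [hdict, hdiag]
  -- the total
  rw [PySem.List.foldl_add (g := fun i =>
      (PySem.Dict.counter (T.take N.toNat)).getD (S.getD i 0) 0)]
  have htot : ((List.range N.toNat).map (fun i =>
        (PySem.Dict.counter (T.take N.toNat)).getD (S.getD i 0) 0)).sum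
      = ((fnum (S.take N.toNat) (T.take N.toNat) : Nat) : Int) := by
    rw [show (fun i => (PySem.Dict.counter (T.take N.toNat)).getD (S.getD i 0) 0)
        = (fun x => (PySem.Dict.counter (T.take N.toNat)).getD x 0) ∘ (fun i => S.getD i 0)
        from rfl, ← List.map_map, take_eq_map_range S N.toNat hns]
    simp only [PySem.Dict.getD_counter]
    rw [sum_map_cast]
    rfl
  rw [htot]
  have : (0 + ((fnum (S.take N.toNat) (T.take N.toNat) : Nat) : Int)
      > ((dnum (S.take N.toNat) (T.take N.toNat) : Nat) : Int))
      ↔ dnum (S.take N.toNat) (T.take N.toNat) < fnum (S.take N.toNat) (T.take N.toNat) := by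
    omega
  simp only [gt_iff_lt] at this ⊢
  split_ifs with h1 h2 h2 <;> first | rfl | (exfalso; omega)

-- ===== VERDICT (by name: the statement is the Claim_ definition above) =====
theorem change_handle_spec : Claim_equal_change_handle := by
  intro N S T _ hpre
  obtain ⟨hs, ht⟩ := hpre
  unfold Spec_change_handle
  by_cases h0 : 0 ≤ N
  · rw [A_eq N S T h0 hs ht, B_eq N S T h0 hs ht]
    obtain ⟨hle, hiff⟩ := core (S.take N.toNat) (T.take N.toNat)
    by_cases hc : crossb (S.take N.toNat) (T.take N.toNat) = true
    · rw [if_pos hc, if_pos (hiff.mpr hc)]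
    · rw [if_neg hc, if_neg (fun h => hc (hiff.mp h))]
  · have hneg : PySem.List.pyRange 0 N = [] := pyRange_neg N (by omega)
    unfold change_handle change_handle_alt
    rw [hneg]
    simp
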